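-- pv_equiv track=rewrite | github.com/Stomachion/AdventOfCode2022 | day21/DecodeMonkeys2.py | get_command2
-- ===== SOURCE A (Python) =====
-- def get_command2(monkeys:dict, command:str):
--     keep_going = True
--     while keep_going:
--         splitted_command = command.split()
--         command = ""
--         count_finished = 0
--         for word in splitted_command:
--             if word == "humn":
--                 command += word + " "
--                 count_finished += 1
--             elif len(word) == 4:
--                 command += "( " + monkeys[word] + " ) "
--             else:
--                 command += word + " "
--                 count_finished += 1
--         if count_finished == len(splitted_command):
--             keep_going = False
--
--     return command
-- ===== SOURCE B (Python) =====
-- def get_command2(monkeys: dict, command: str):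
--     # One-pass expansion with an explicit work stack instead of repeated
--     # full-string rewrite passes.
--     parts = []
--     stack = command.split()[::-1]
--     while stack:
--         word = stack.pop()
--         if word != "humn" and len(word) == 4:
--             parts.append("(")
--             stack.append(")")
--             stack.extend(reversed(monkeys[word].split()))
--         else:
--             parts.append(word)
--     return "".join(p + " " for p in parts)
-- ===== Notes on version B (the rewrite author's own statement) =====
-- stated objective: alternative
-- what changed: A repeatedly re-splits and rebuilds the whole command string, one full rewrite pass per nesting level, until a pass expands nothing; B expands each reference exactly once with an explicit work stack, emitting every output token a single time.
import Mathlib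
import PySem

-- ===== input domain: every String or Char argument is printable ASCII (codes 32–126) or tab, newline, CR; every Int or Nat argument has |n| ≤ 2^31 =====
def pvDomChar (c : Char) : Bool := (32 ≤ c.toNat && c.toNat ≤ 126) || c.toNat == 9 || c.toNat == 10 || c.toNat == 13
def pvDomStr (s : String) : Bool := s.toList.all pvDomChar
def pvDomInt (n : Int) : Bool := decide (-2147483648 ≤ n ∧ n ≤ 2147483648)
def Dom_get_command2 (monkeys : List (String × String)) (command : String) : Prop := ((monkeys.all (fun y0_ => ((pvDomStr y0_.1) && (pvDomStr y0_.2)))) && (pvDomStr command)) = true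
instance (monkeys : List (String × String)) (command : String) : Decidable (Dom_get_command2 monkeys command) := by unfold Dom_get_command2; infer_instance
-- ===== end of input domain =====

-- B replaces A's repeated full-string rewrite passes (each pass re-splits and rebuilds the
-- whole command) by a single explicit-stack expansion emitting each output token once.

-- ===== PORT A =====
-- A's `while keep_going` loop, with fuel; under Pre_ the loop needs at most monkeys.length + 1
-- passes (the reachable reference graph is acyclic, so nesting depth is bounded by the number
-- of distinct keys), so the fuel monkeys.length + 2 is never exhausted.
-- `monkeys[word]` (KeyError possible in Python) is ported as `getD word ""`; Pre_ excludes
-- every input on which the lookup can miss.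
def get_command2_loop (d : PySem.Dict String String) : Nat → String → String
  | 0, command => command
  | f + 1, command =>
    let splitted_command := PySem.Str.split₀ command
    let st := splitted_command.foldl (fun (acc : String × Nat) word =>
      if word == "humn" then (acc.1 ++ word ++ " ", acc.2 + 1)
      else if PySem.Str.len word == 4 then (acc.1 ++ "( " ++ d.getD word "" ++ " ) ", acc.2)
      else (acc.1 ++ word ++ " ", acc.2 + 1)) ("", 0)
    if st.2 == splitted_command.length then st.1 else get_command2_loop d f st.1

def get_command2 (monkeys : List (String × String)) (command : String) : String :=
  get_command2_loop (PySem.Dict.mk monkeys) (monkeys.length + 2) command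

-- ===== PORT B =====
-- B's `while stack` loop, with fuel; the stack is kept top-first (Python pops from the end of
-- the reversed list).  Under Pre_ the number of pops is at most tot ^ (monkeys.length + 3),
-- so the fuel is never exhausted.
def get_command2_alt_go (d : PySem.Dict String String) : Nat → List String → List String → List String
  | 0, _, parts => parts
  | _ + 1, [], parts => parts
  | f + 1, word :: stack, parts =>
    if !(word == "humn") && (PySem.Str.len word == 4) then
      get_command2_alt_go d f (PySem.Str.split₀ (d.getD word "") ++ ")" :: stack) (parts ++ ["("])
    else
      get_command2_alt_go d f stack (parts ++ [word])

def get_command2_alt (monkeys : List (String × String)) (command : String) : String :=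
  let d := PySem.Dict.mk monkeys
  let stack := PySem.Str.split₀ command
  let tot := stack.length + (monkeys.map (fun p => (PySem.Str.split₀ p.2).length)).sum + 2
  let parts := get_command2_alt_go d (tot ^ (monkeys.length + 3)) stack []
  PySem.Str.join "" (parts.map (fun p => p ++ " "))

-- ===== PRECONDITION & SPEC =====
-- a token is "terminal" for A's loop: left alone by a pass ("humn", or length ≠ 4)
def pvTm (w : String) : Bool := (w == "humn") || !(PySem.Str.len w == 4)

-- a non-terminal token: one both programs replace by the parenthesised monkey value
def pvNt (w : String) : Bool := !pvTm w

-- index of the first entry whose key is w (the entry Python's dict lookup returns)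
def pvIdx (monkeys : List (String × String)) (w : String) : Option Nat :=
  List.findIdx? (fun p => p.1 == w) monkeys

-- the references a token w expands to: the non-terminal tokens of the monkey value of w
def pvKids (d : PySem.Dict String String) (w : String) : List String :=
  (PySem.Str.split₀ (d.getD w "")).filter pvNt

-- one step of the reference graph's reachability closure
def pvT (d : PySem.Dict String String) (s : List String) : List String :=
  (s ++ s.flatMap (pvKids d)).dedup

-- f-fold iteration of that step
def pvClose (d : PySem.Dict String String) : Nat → List String → List String
  | 0, s => s
  | f + 1, s => pvClose d f (pvT d s)

-- all tokens that can ever take part in the expansion (a universe for the closure)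
def pvUni (monkeys : List (String × String)) (command : String) : List String :=
  (PySem.Str.split₀ command).filter pvNt
    ++ monkeys.flatMap (fun p => (PySem.Str.split₀ p.2).filter pvNt)

def pvF (monkeys : List (String × String)) (command : String) : Nat :=
  (pvUni monkeys command).length + 1

-- the non-terminal tokens reachable from the command (the closure stabilises within pvF steps)
def pvR (monkeys : List (String × String)) (command : String) : List String :=
  pvClose (PySem.Dict.mk monkeys) (pvF monkeys command)
    ((PySem.Str.split₀ command).filter pvNt)

-- the non-terminal tokens reachable strictly below w
def pvD (monkeys : List (String × String)) (command : String) (w : String) : List String :=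
  pvClose (PySem.Dict.mk monkeys) (pvF monkeys command) (pvKids (PySem.Dict.mk monkeys) w)

-- Pre_ excludes exactly the inputs on which the Python A does not return: a reachable
-- reference that is not a key (KeyError) or a reachable reference cycle (the rewrite loop
-- never finishes).  It is a condition on the INPUT's reference graph only — every reference
-- reachable from the command resolves to a dict key and none lies on a cycle.  pvClose is
-- not a run of either port (which rewrite strings / a token stack): it is the standard
-- transitive closure of the finite edge relation 'the value of key w mentions reference x',
-- iterated pvF times only because that provably reaches the fixed point (pv_close_closed).
def Pre_get_command2 (monkeys : List (String × String)) (command : String) : Prop :=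
  ((pvR monkeys command).all (fun w =>
      (pvIdx monkeys w).isSome && !((pvD monkeys command w).contains w))) = true

instance (monkeys : List (String × String)) (command : String) : Decidable (Pre_get_command2 monkeys command) := by
  unfold Pre_get_command2; infer_instance

def pvWitness_get_command2 : (List (String × String)) × String :=
  ([("abcd", "efgh + 2"), ("efgh", "humn * 3")], "abcd - 5")

def Spec_get_command2 (monkeys : List (String × String)) (command : String) (out : String) : Prop := out = get_command2_alt monkeys command
instance (monkeys : List (String × String)) (command : String) (out : String) : Decidable (Spec_get_command2 monkeys command out) := by unfold Spec_get_command2; infer_instance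

-- ===== CLAIM (what is proved, stated in full; the proofs are below) =====
def Claim_equal_get_command2 : Prop := ∀ (monkeys : List (String × String)) (command : String), Dom_get_command2 monkeys command → Pre_get_command2 monkeys command → Spec_get_command2 monkeys command (get_command2 monkeys command)

-- ===== LEMMAS AND PROOFS =====

-- ---- generic facts about Python str.split() (PySem.Chars.split₀) ----

theorem pv_go_acc (s : List Char) : ∀ cur acc, PySem.Chars.split₀.go s cur acc = acc.reverse ++ PySem.Chars.split₀.go s cur [] := by
  induction s with
  | nil => intro cur acc; simp [PySem.Chars.split₀.go]; split <;> simp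
  | cons c rest ih =>
    intro cur acc
    simp only [PySem.Chars.split₀.go]
    split
    · split
      · exact ih [] acc
      · rw [ih [] (cur.reverse :: acc), ih [] [cur.reverse]]; simp
    · exact ih (c :: cur) acc

theorem pv_go_word (w : List Char) (hw : ∀ c ∈ w, PySem.Chars.isspace c = false) :
    ∀ s cur acc, PySem.Chars.split₀.go (w ++ s) cur acc = PySem.Chars.split₀.go s (w.reverse ++ cur) acc := by
  induction w with
  | nil => intro s cur acc; simp
  | cons c t ih =>
    intro s cur acc
    have hc : PySem.Chars.isspace c = false := hw c (by simp)
    simp only [List.cons_append, PySem.Chars.split₀.go, hc]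
    rw [ih (fun x hx => hw x (by simp [hx])) s (c :: cur) acc]
    simp

-- split of a single whitespace-free nonempty word
theorem pv_split_word (w : List Char) (hne : w ≠ []) (hw : ∀ c ∈ w, PySem.Chars.isspace c = false) :
    PySem.Chars.split₀ w = [w] := by
  unfold PySem.Chars.split₀
  rw [show w = w ++ [] by simp, pv_go_word w hw [] [] []]
  simp [PySem.Chars.split₀.go, hne]

theorem pv_isspace_space : PySem.Chars.isspace ' ' = true := by simp [PySem.Chars.isspace]

theorem pv_go_drop_space (v : List Char) : ∀ cur, PySem.Chars.split₀.go (v ++ [' ']) cur [] = PySem.Chars.split₀.go v cur [] := by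
  induction v with
  | nil =>
    intro cur
    simp only [List.nil_append, PySem.Chars.split₀.go, pv_isspace_space, if_true]
    by_cases hc : cur.isEmpty <;> simp [PySem.Chars.split₀.go, hc]
  | cons c v' ih =>
    intro cur
    simp only [List.cons_append, PySem.Chars.split₀.go]
    by_cases hc : PySem.Chars.isspace c = true
    · simp only [hc, if_true]
      by_cases he : cur.isEmpty
      · simp only [he, if_true]; exact ih []
      · simp only [he, Bool.false_eq_true, if_false]
        rw [pv_go_acc (v' ++ [' ']), pv_go_acc v', ih []]
    · simp only [hc, Bool.false_eq_true, if_false]; exact ih (c :: cur)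

theorem pv_go_split (v : List Char) : ∀ cur ys, PySem.Chars.split₀.go (v ++ ' ' :: ys) cur []
    = PySem.Chars.split₀.go (v ++ [' ']) cur [] ++ PySem.Chars.split₀.go ys [] [] := by
  induction v with
  | nil =>
    intro cur ys
    simp only [List.nil_append, PySem.Chars.split₀.go, pv_isspace_space, if_true]
    by_cases he : cur.isEmpty
    · simp [he, PySem.Chars.split₀.go]
    · simp only [he, Bool.false_eq_true, if_false]
      rw [pv_go_acc ys [] [cur.reverse]]
      simp [PySem.Chars.split₀.go, he]
  | cons c v' ih =>
    intro cur ys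
    simp only [List.cons_append, PySem.Chars.split₀.go]
    by_cases hc : PySem.Chars.isspace c = true
    · simp only [hc, if_true]
      by_cases he : cur.isEmpty
      · simp only [he, if_true]; exact ih [] ys
      · simp only [he, Bool.false_eq_true, if_false]
        rw [pv_go_acc (v' ++ ' ' :: ys), pv_go_acc (v' ++ [' ']), ih [] ys]
        simp
    · simp only [hc, Bool.false_eq_true, if_false]; exact ih (c :: cur) ys

-- master lemma: a space splits a split() into two independent splits
theorem pv_split_space (v : List Char) : ∀ ys, PySem.Chars.split₀ (v ++ ' ' :: ys) = PySem.Chars.split₀ v ++ PySem.Chars.split₀ ys := by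
  intro ys
  unfold PySem.Chars.split₀
  rw [pv_go_split, pv_go_drop_space]

theorem pv_go_good (s : List Char) : ∀ cur acc, (∀ c ∈ cur, PySem.Chars.isspace c = false) →
    (∀ w ∈ acc, w ≠ [] ∧ ∀ c ∈ w, PySem.Chars.isspace c = false) →
    ∀ w ∈ PySem.Chars.split₀.go s cur acc, w ≠ [] ∧ ∀ c ∈ w, PySem.Chars.isspace c = false := by
  induction s with
  | nil =>
    intro cur acc hcur hacc w hw
    simp only [PySem.Chars.split₀.go] at hw
    by_cases he : cur.isEmpty
    · rw [if_pos he] at hw; exact hacc w (by simpa using hw)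
    · rw [if_neg he] at hw
      simp only [List.mem_reverse, List.mem_cons] at hw
      rcases hw with h | h
      · subst h
        refine ⟨by simpa [List.isEmpty_iff] using he, ?_⟩
        intro c hc; exact hcur c (by simpa using hc)
      · exact hacc w h
  | cons c rest ih =>
    intro cur acc hcur hacc w hw
    simp only [PySem.Chars.split₀.go] at hw
    by_cases hc : PySem.Chars.isspace c = true
    · rw [if_pos hc] at hw
      by_cases he : cur.isEmpty
      · rw [if_pos he] at hw; exact ih [] acc (by simp) hacc w hw
      · rw [if_neg he] at hw
        refine ih [] (cur.reverse :: acc) (by simp) ?_ w hw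
        intro x hx
        rcases List.mem_cons.mp hx with h | h
        · subst h
          refine ⟨by simpa [List.isEmpty_iff] using he, ?_⟩
          intro y hy; exact hcur y (by simpa using hy)
        · exact hacc x h
    · rw [if_neg hc] at hw
      refine ih (c :: cur) acc ?_ hacc w hw
      intro x hx
      rcases List.mem_cons.mp hx with h | h
      · subst h; simpa using hc
      · exact hcur x h

-- every token of a split() is nonempty and whitespace-free
theorem pv_split_good (s : List Char) : ∀ w ∈ PySem.Chars.split₀ s, w ≠ [] ∧ ∀ c ∈ w, PySem.Chars.isspace c = false := by
  exact pv_go_good s [] [] (by simp) (by simp)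

-- ---- String-level versions ----

def pvGood (w : String) : Prop := w.toList ≠ [] ∧ ∀ c ∈ w.toList, PySem.Chars.isspace c = false

theorem pv_ssplit_word (w : String) (h : pvGood w) : PySem.Str.split₀ w = [w] := by
  unfold PySem.Str.split₀
  rw [pv_split_word w.toList h.1 h.2]
  simp

theorem pv_ssplit_space (u r : String) : PySem.Str.split₀ (u ++ " " ++ r) = PySem.Str.split₀ u ++ PySem.Str.split₀ r := by
  unfold PySem.Str.split₀
  rw [show (u ++ " " ++ r).toList = u.toList ++ ' ' :: r.toList by simp [String.toList_append]]
  rw [pv_split_space]; simp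

theorem pv_ssplit_good (s : String) : ∀ w ∈ PySem.Str.split₀ s, pvGood w := by
  intro w hw
  unfold PySem.Str.split₀ at hw
  simp only [List.mem_map] at hw
  obtain ⟨cs, hcs, rfl⟩ := hw
  have := pv_split_good s.toList cs hcs
  constructor
  · simpa using this.1
  · simpa using this.2

theorem pv_ssplit_empty : PySem.Str.split₀ "" = [] := by decide

-- ---- token-level semantics shared by both ports ----

def pvStep (d : PySem.Dict String String) (w : String) : List String :=
  if pvTm w then [w] else "(" :: PySem.Str.split₀ (d.getD w "") ++ [")"]

def pvEx (d : PySem.Dict String String) : Nat → String → List String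
  | 0, w => [w]
  | n + 1, w => if pvTm w then [w] else "(" :: (PySem.Str.split₀ (d.getD w "")).flatMap (pvEx d n) ++ [")"]

theorem pv_ex_tm (d : PySem.Dict String String) (n : Nat) (w : String) (h : pvTm w = true) : pvEx d n w = [w] := by
  cases n <;> simp [pvEx, h]

theorem pv_ex_len_pos (d : PySem.Dict String String) (m : Nat) (w : String) : 1 ≤ (pvEx d m w).length := by
  cases m <;> simp [pvEx] <;> split <;> simp

theorem pv_step_ex1 (d : PySem.Dict String String) (w : String) : pvStep d w = pvEx d 1 w := by
  simp [pvStep, pvEx]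

theorem pv_ex_comp (d : PySem.Dict String String) (m : Nat) (w : String) :
    (pvEx d 1 w).flatMap (pvEx d m) = pvEx d (m + 1) w := by
  by_cases h : pvTm w = true
  · simp [pv_ex_tm, h]
  · simp only [pvEx, h, Bool.false_eq_true, if_false]
    simp [List.flatMap_append, pv_ex_tm, pvTm]

theorem pv_flat_tm (d : PySem.Dict String String) (k : Nat) (ws : List String) (h : ws.all pvTm = true) :
    ws.flatMap (pvEx d k) = ws := by
  induction ws with
  | nil => simp
  | cons w t ih =>
    simp only [List.all_cons, Bool.and_eq_true] at h
    simp [pv_ex_tm d k w h.1, ih h.2]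

theorem pv_tm_lpar : pvTm "(" = true := by simp [pvTm, PySem.Str.len]
theorem pv_tm_rpar : pvTm ")" = true := by simp [pvTm, PySem.Str.len]

-- ---- the A-side pass ----

def pvChunk (d : PySem.Dict String String) (w : String) : String :=
  if pvTm w then w ++ " " else "( " ++ d.getD w "" ++ " ) "

def pvChunks (d : PySem.Dict String String) : List String → String
  | [] => ""
  | w :: t => pvChunk d w ++ pvChunks d t

def pvRender (ws : List String) : String := PySem.Str.join "" (ws.map (fun p => p ++ " "))

theorem pv_join_cons (x : String) (l : List String) : PySem.Str.join "" (x :: l) = x ++ PySem.Str.join "" l := by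
  have h : ∀ (a : List Char) (m : List (List Char)), PySem.Chars.join [] (a :: m) = a ++ PySem.Chars.join [] m := by
    intro a m; cases m <;> simp [PySem.Chars.join, List.intercalate]
  apply String.toList_inj.mp
  simp [PySem.Str.join, h]

theorem pv_fold_pass (d : PySem.Dict String String) (ws : List String) : ∀ (a : String) (n : Nat),
    ws.foldl (fun (acc : String × Nat) word =>
      if word == "humn" then (acc.1 ++ word ++ " ", acc.2 + 1)
      else if PySem.Str.len word == 4 then (acc.1 ++ "( " ++ d.getD word "" ++ " ) ", acc.2)
      else (acc.1 ++ word ++ " ", acc.2 + 1)) (a, n)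
    = (a ++ pvChunks d ws, n + ws.countP pvTm) := by
  induction ws with
  | nil => intro a n; simp [pvChunks]
  | cons w t ih =>
    intro a n
    by_cases h1 : (w == "humn") = true
    · simp only [List.foldl_cons, h1, if_true, ih, List.countP_cons]
      have htm : pvTm w = true := by simp [pvTm, h1]
      simp [pvChunks, pvChunk, htm, String.append_assoc]
      omega
    · by_cases h2 : (PySem.Str.len w == 4) = true
      · have htm : pvTm w = false := by
          simp [pvTm]; exact ⟨by simpa using h1, by simpa using h2⟩
        simp only [List.foldl_cons, h1, h2, Bool.false_eq_true, if_false, if_true, ih, List.countP_cons]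
        simp [pvChunks, pvChunk, htm, String.append_assoc]
      · have htm : pvTm w = true := by
          simp [pvTm]; exact Or.inr (by simpa using h2)
        simp only [List.foldl_cons, h1, h2, Bool.false_eq_true, if_false, ih, List.countP_cons]
        simp [pvChunks, pvChunk, htm, String.append_assoc]
        omega

theorem pv_ssplit_wordspace (w r : String) (h : pvGood w) :
    PySem.Str.split₀ (w ++ " " ++ r) = w :: PySem.Str.split₀ r := by
  rw [pv_ssplit_space, pv_ssplit_word w h]; simp

theorem pv_ssplit_chunk (v r : String) :
    PySem.Str.split₀ ("( " ++ v ++ " ) " ++ r) = "(" :: (PySem.Str.split₀ v ++ ")" :: PySem.Str.split₀ r) := by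
  have e1 : ("( " ++ v ++ " ) " ++ r) = "(" ++ " " ++ (v ++ " " ++ (")" ++ " " ++ r)) := by
    apply String.toList_inj.mp; simp
  rw [e1, pv_ssplit_wordspace _ _ (by constructor <;> simp [PySem.Chars.isspace]),
      pv_ssplit_space, pv_ssplit_wordspace _ _ (by constructor <;> simp [PySem.Chars.isspace])]

theorem pv_chunks_split (d : PySem.Dict String String) (ws : List String) (h : ∀ w ∈ ws, pvGood w) :
    PySem.Str.split₀ (pvChunks d ws) = ws.flatMap (pvStep d) := by
  induction ws with
  | nil => simpa [pvChunks] using pv_ssplit_empty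
  | cons w t ih =>
    have hw : pvGood w := h w (by simp)
    have iht := ih (fun x hx => h x (by simp [hx]))
    by_cases htm : pvTm w = true
    · have hsh : pvChunks d (w :: t) = w ++ " " ++ pvChunks d t := by
        simp [pvChunks, pvChunk, htm, String.append_assoc]
      rw [hsh, pv_ssplit_wordspace w _ hw, iht]
      simp [pvStep, htm]
    · have hsh : pvChunks d (w :: t) = "( " ++ d.getD w "" ++ " ) " ++ pvChunks d t := by
        simp [pvChunks, pvChunk, htm, String.append_assoc]
      rw [hsh, pv_ssplit_chunk, iht]
      simp [pvStep, htm]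

theorem pv_chunks_render (d : PySem.Dict String String) (ws : List String) (h : ws.all pvTm = true) :
    pvChunks d ws = pvRender ws := by
  induction ws with
  | nil => simp only [pvChunks, pvRender, List.map_nil]; decide
  | cons w t ih =>
    simp only [List.all_cons, Bool.and_eq_true] at h
    simp [pvChunks, pvChunk, h.1, pvRender, pv_join_cons, ih h.2, String.append_assoc]

-- ---- the A-side loop ----

-- one unfolding of A's loop, with the pass fold already evaluated
theorem pv_loop_unfold (d : PySem.Dict String String) (f : Nat) (s : String) :
    get_command2_loop d (f + 1) s =
      (if (List.countP pvTm (PySem.Str.split₀ s) == (PySem.Str.split₀ s).length) = true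
       then pvChunks d (PySem.Str.split₀ s)
       else get_command2_loop d f (pvChunks d (PySem.Str.split₀ s))) := by
  show (let splitted_command := PySem.Str.split₀ s
        let st := splitted_command.foldl (fun (acc : String × Nat) word =>
          if word == "humn" then (acc.1 ++ word ++ " ", acc.2 + 1)
          else if PySem.Str.len word == 4 then (acc.1 ++ "( " ++ d.getD word "" ++ " ) ", acc.2)
          else (acc.1 ++ word ++ " ", acc.2 + 1)) ("", 0)
        if st.2 == splitted_command.length then st.1 else get_command2_loop d f st.1) = _
  simp only [pv_fold_pass d _ "" 0]
  simp

-- if all tokens are terminal, A's loop returns at once with the rendered tokens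
theorem pv_loopA_term (d : PySem.Dict String String) (f : Nat) (s : String)
    (hall : (PySem.Str.split₀ s).all pvTm = true) :
    get_command2_loop d (f + 1) s = pvRender (PySem.Str.split₀ s) := by
  rw [pv_loop_unfold]
  rw [if_pos (by simp [List.countP_eq_length.mpr (List.all_eq_true.mp hall)])]
  exact pv_chunks_render d _ hall

theorem pv_loopA (d : PySem.Dict String String) : ∀ (k f : Nat), k < f → ∀ s : String,
    ((PySem.Str.split₀ s).flatMap (pvEx d k)).all pvTm = true →
    get_command2_loop d f s = pvRender ((PySem.Str.split₀ s).flatMap (pvEx d k)) := by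
  intro k
  induction k with
  | zero =>
    intro f hf s hall
    obtain ⟨f', rfl⟩ : ∃ f', f = f' + 1 := ⟨f - 1, by omega⟩
    have hws : (PySem.Str.split₀ s).flatMap (pvEx d 0) = PySem.Str.split₀ s := by simp [pvEx]
    rw [hws] at hall ⊢
    exact pv_loopA_term d f' s hall
  | succ k ih =>
    intro f hf s hall
    obtain ⟨f', rfl⟩ : ∃ f', f = f' + 1 := ⟨f - 1, by omega⟩
    by_cases hterm : (PySem.Str.split₀ s).all pvTm = true
    · rw [pv_flat_tm d (k+1) _ hterm] at hall ⊢
      exact pv_loopA_term d f' s hterm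
    · have hsplit : PySem.Str.split₀ (pvChunks d (PySem.Str.split₀ s))
          = (PySem.Str.split₀ s).flatMap (pvEx d 1) := by
        rw [pv_chunks_split d _ (pv_ssplit_good s)]
        exact List.flatMap_congr (fun w _ => pv_step_ex1 d w)
      have hcomp : ((PySem.Str.split₀ s).flatMap (pvEx d 1)).flatMap (pvEx d k)
          = (PySem.Str.split₀ s).flatMap (pvEx d (k + 1)) := by
        rw [List.flatMap_assoc]
        exact List.flatMap_congr (fun w _ => pv_ex_comp d k w)
      rw [pv_loop_unfold]
      rw [if_neg ?hne]
      case hne =>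
        have : ¬ (List.countP pvTm (PySem.Str.split₀ s) = (PySem.Str.split₀ s).length) := by
          intro hc
          exact hterm (List.all_eq_true.mpr (List.countP_eq_length.mp hc))
        simpa using this
      rw [ih f' (by omega) _ (by rw [hsplit, hcomp]; exact hall), hsplit, hcomp]

-- ---- the reachability closure: basic membership facts ----

theorem pv_mem_T_iff (d : PySem.Dict String String) (s : List String) (x : String) :
    x ∈ pvT d s ↔ x ∈ s ∨ ∃ w ∈ s, x ∈ pvKids d w := by
  simp [pvT, List.mem_dedup, List.mem_append, List.mem_flatMap]

theorem pv_close_succ (d : PySem.Dict String String) (f : Nat) (s : List String) :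
    pvClose d (f + 1) s = pvClose d f (pvT d s) := rfl

theorem pv_mem_close_of_mem (d : PySem.Dict String String) (f : Nat) (s : List String) (x : String)
    (h : x ∈ s) : x ∈ pvClose d f s := by
  induction f generalizing s with
  | zero => exact h
  | succ f ih => exact ih (pvT d s) ((pv_mem_T_iff d s x).mpr (Or.inl h))

theorem pv_T_mono (d : PySem.Dict String String) (s t : List String) (h : ∀ x ∈ s, x ∈ t) :
    ∀ x ∈ pvT d s, x ∈ pvT d t := by
  intro x hx
  rcases (pv_mem_T_iff d s x).mp hx with h1 | ⟨w, hw, hk⟩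
  · exact (pv_mem_T_iff d t x).mpr (Or.inl (h x h1))
  · exact (pv_mem_T_iff d t x).mpr (Or.inr ⟨w, h w hw, hk⟩)

theorem pv_close_mono (d : PySem.Dict String String) (f : Nat) (s t : List String)
    (h : ∀ x ∈ s, x ∈ t) : ∀ x ∈ pvClose d f s, x ∈ pvClose d f t := by
  induction f generalizing s t with
  | zero => exact h
  | succ f ih => exact ih (pvT d s) (pvT d t) (pv_T_mono d s t h)

theorem pv_close_congr (d : PySem.Dict String String) (f : Nat) (s t : List String)
    (h : ∀ x, x ∈ s ↔ x ∈ t) : ∀ x, x ∈ pvClose d f s ↔ x ∈ pvClose d f t := by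
  intro x
  exact ⟨fun hx => pv_close_mono d f s t (fun y hy => (h y).mp hy) x hx,
         fun hx => pv_close_mono d f t s (fun y hy => (h y).mpr hy) x hx⟩

def pvClosed (d : PySem.Dict String String) (s : List String) : Prop :=
  ∀ w ∈ s, ∀ x ∈ pvKids d w, x ∈ s

theorem pv_T_eq_of_closed (d : PySem.Dict String String) (s : List String) (h : pvClosed d s) :
    ∀ x, x ∈ pvT d s ↔ x ∈ s := by
  intro x
  constructor
  · intro hx
    rcases (pv_mem_T_iff d s x).mp hx with h1 | ⟨w, hw, hk⟩
    · exact h1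
    · exact h w hw x hk
  · intro hx; exact (pv_mem_T_iff d s x).mpr (Or.inl hx)

theorem pv_close_of_closed (d : PySem.Dict String String) (f : Nat) (s : List String)
    (h : pvClosed d s) : ∀ x, x ∈ pvClose d f s ↔ x ∈ s := by
  induction f generalizing s with
  | zero => intro x; rfl
  | succ f ih =>
    intro x
    rw [pv_close_succ]
    rw [pv_close_congr d f (pvT d s) s (pv_T_eq_of_closed d s h) x]
    exact ih s h x

theorem pv_close_subset_closed (d : PySem.Dict String String) (f : Nat) (s t : List String)
    (hs : ∀ x ∈ s, x ∈ t) (ht : pvClosed d t) : ∀ x ∈ pvClose d f s, x ∈ t := by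
  induction f generalizing s with
  | zero => exact hs
  | succ f ih =>
    refine ih (pvT d s) ?_
    intro x hx
    rcases (pv_mem_T_iff d s x).mp hx with h1 | ⟨w, hw, hk⟩
    · exact hs x h1
    · exact ht w (hs w hw) x hk

theorem pv_close_add (d : PySem.Dict String String) (a b : Nat) (s : List String) :
    pvClose d (a + b) s = pvClose d b (pvClose d a s) := by
  induction a generalizing s with
  | zero => simp [pvClose]
  | succ a ih =>
    rw [show a + 1 + b = (a + b) + 1 by omega, pv_close_succ, pv_close_succ, ih]

-- ---- stabilisation of the closure within pvF steps ----

theorem pv_kids_sub_uni (monkeys : List (String × String)) (command : String) (w x : String)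
    (hx : x ∈ pvKids (PySem.Dict.mk monkeys) w) : x ∈ pvUni monkeys command := by
  unfold pvKids at hx
  cases hg : (PySem.Dict.mk monkeys).get? w with
  | none =>
    rw [PySem.Dict.getD, hg, Option.getD_none, pv_ssplit_empty] at hx
    simp at hx
  | some v =>
    rw [PySem.Dict.getD, hg, Option.getD_some] at hx
    have hm : (w, v) ∈ monkeys := PySem.Dict.mem_items_of_get?_eq_some _ hg
    unfold pvUni
    refine List.mem_append.mpr (Or.inr ?_)
    exact List.mem_flatMap.mpr ⟨(w, v), hm, hx⟩

theorem pv_card_grow (d : PySem.Dict String String) (s : List String) (F : Nat)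
    (h : ∀ g < F, ¬ (∀ x, x ∈ pvClose d g s ↔ x ∈ pvClose d (g + 1) s)) :
    ∀ f ≤ F, f + s.toFinset.card ≤ (pvClose d f s).toFinset.card := by
  intro f
  induction f with
  | zero => intro _; simp [pvClose]
  | succ f ih =>
    intro hf
    have hlt : f < F := by omega
    have hsub : (pvClose d f s).toFinset ⊆ (pvClose d (f + 1) s).toFinset := by
      intro x hx
      rw [List.mem_toFinset] at hx ⊢
      rw [show f + 1 = f + 1 by rfl, pv_close_add d f 1 s]
      exact (pv_mem_T_iff d _ x).mpr (Or.inl hx)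
    have hne : (pvClose d f s).toFinset ≠ (pvClose d (f + 1) s).toFinset := by
      intro he
      exact h f hlt (fun x => by
        rw [← List.mem_toFinset, ← List.mem_toFinset (l := pvClose d (f+1) s), he])
    have hcard : (pvClose d f s).toFinset.card < (pvClose d (f + 1) s).toFinset.card :=
      Finset.card_lt_card (lt_of_le_of_ne hsub hne)
    have := ih (by omega)
    omega

theorem pv_close_closed (monkeys : List (String × String)) (command : String) (s : List String)
    (hs : ∀ x ∈ s, x ∈ pvUni monkeys command) :
    pvClosed (PySem.Dict.mk monkeys) (pvClose (PySem.Dict.mk monkeys) (pvF monkeys command) s) := by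
  set d := PySem.Dict.mk monkeys with hd
  set F := pvF monkeys command with hF
  -- every iterate stays inside the universe
  have huni : ∀ f, ∀ x ∈ pvClose d f s, x ∈ pvUni monkeys command := by
    intro f
    induction f generalizing s hs with
    | zero => exact hs
    | succ f ih =>
      refine ih (pvT d s) ?_
      intro x hx
      rcases (pv_mem_T_iff d s x).mp hx with h1 | ⟨w, _, hk⟩
      · exact hs x h1
      · exact pv_kids_sub_uni monkeys command w x hk
  -- some step before F is a fixed point
  have hstab : ∃ g < F, ∀ x, x ∈ pvClose d g s ↔ x ∈ pvClose d (g + 1) s := by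
    by_contra hcon
    have hcon' : ∀ g < F, ¬ (∀ x, x ∈ pvClose d g s ↔ x ∈ pvClose d (g + 1) s) :=
      fun g hg hiff => hcon ⟨g, hg, hiff⟩
    have h1 := pv_card_grow d s F hcon' F (le_refl F)
    have h2 : (pvClose d F s).toFinset ⊆ (pvUni monkeys command).toFinset := by
      intro x hx
      rw [List.mem_toFinset] at hx ⊢
      exact huni F x hx
    have h3 : (pvClose d F s).toFinset.card ≤ (pvUni monkeys command).toFinset.card :=
      Finset.card_le_card h2
    have h4 : (pvUni monkeys command).toFinset.card ≤ (pvUni monkeys command).length :=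
      List.toFinset_card_le _
    have hFeq : F = (pvUni monkeys command).length + 1 := by rw [hF]; rfl
    omega
  obtain ⟨g, hg, hfix⟩ := hstab
  -- the fixed point is closed
  have hclosedg : pvClosed d (pvClose d g s) := by
    intro w hw x hx
    have : x ∈ pvT d (pvClose d g s) := (pv_mem_T_iff d _ x).mpr (Or.inr ⟨w, hw, hx⟩)
    have h1 : x ∈ pvClose d (g + 1) s := by
      rw [pv_close_add d g 1 s]
      exact this
    exact (hfix x).mpr h1
  -- the F-iterate has the same members as the fixed point
  have hsame : ∀ x, x ∈ pvClose d F s ↔ x ∈ pvClose d g s := by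
    intro x
    rw [show F = g + (F - g) by omega, pv_close_add]
    exact pv_close_of_closed d (F - g) (pvClose d g s) hclosedg x
  intro w hw x hx
  exact (hsame x).mpr (hclosedg w ((hsame w).mp hw) x hx)

-- ---- consequences of Pre_ ----

theorem pv_pre_key (monkeys : List (String × String)) (command : String)
    (h : Pre_get_command2 monkeys command) :
    ∀ w ∈ pvR monkeys command, (pvIdx monkeys w).isSome := by
  intro w hw
  unfold Pre_get_command2 at h
  have := List.all_eq_true.mp h w hw
  exact (Bool.and_eq_true_iff.mp this).1

theorem pv_pre_acyc (monkeys : List (String × String)) (command : String)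
    (h : Pre_get_command2 monkeys command) :
    ∀ w ∈ pvR monkeys command, w ∉ pvD monkeys command w := by
  intro w hw
  unfold Pre_get_command2 at h
  have h2 := (Bool.and_eq_true_iff.mp (List.all_eq_true.mp h w hw)).2
  rw [Bool.not_eq_true'] at h2
  simpa using h2

theorem pv_R_closed (monkeys : List (String × String)) (command : String) :
    pvClosed (PySem.Dict.mk monkeys) (pvR monkeys command) := by
  refine pv_close_closed monkeys command _ ?_
  intro x hx
  exact List.mem_append.mpr (Or.inl hx)

theorem pv_D_closed (monkeys : List (String × String)) (command : String) (w : String) :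
    pvClosed (PySem.Dict.mk monkeys) (pvD monkeys command w) := by
  exact pv_close_closed monkeys command _ (pv_kids_sub_uni monkeys command w)

-- ---- the rank: number of distinct keys reachable strictly below a token ----

def pvRank (monkeys : List (String × String)) (command : String) (w : String) : Nat :=
  (((pvD monkeys command w).filter (fun x => (pvIdx monkeys x).isSome)).toFinset).card

theorem pv_rank_lt (monkeys : List (String × String)) (command : String)
    (hpre : Pre_get_command2 monkeys command) (w x : String)
    (hw : w ∈ pvR monkeys command) (hx : x ∈ pvKids (PySem.Dict.mk monkeys) w) :
    pvRank monkeys command x < pvRank monkeys command w := by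
  have hxR : x ∈ pvR monkeys command := pv_R_closed monkeys command w hw x hx
  have hxDw : x ∈ pvD monkeys command w := pv_mem_close_of_mem _ _ _ x hx
  have hkidsx : ∀ y ∈ pvKids (PySem.Dict.mk monkeys) x, y ∈ pvD monkeys command w :=
    pv_D_closed monkeys command w x hxDw
  have hDxDw : ∀ y ∈ pvD monkeys command x, y ∈ pvD monkeys command w :=
    pv_close_subset_closed _ _ _ _ hkidsx (pv_D_closed monkeys command w)
  have hxkey : (pvIdx monkeys x).isSome := pv_pre_key monkeys command hpre x hxR
  have hxnotDx : x ∉ pvD monkeys command x := pv_pre_acyc monkeys command hpre x hxR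
  apply Finset.card_lt_card
  constructor
  · intro y hy
    rw [List.mem_toFinset, List.mem_filter] at hy ⊢
    exact ⟨hDxDw y hy.1, hy.2⟩
  · intro hsub
    have : x ∈ ((pvD monkeys command x).filter (fun z => (pvIdx monkeys z).isSome)).toFinset := by
      apply hsub
      rw [List.mem_toFinset, List.mem_filter]
      exact ⟨hxDw, hxkey⟩
    rw [List.mem_toFinset, List.mem_filter] at this
    exact hxnotDx this.1

theorem pv_key_mem_fst (monkeys : List (String × String)) (x : String)
    (h : (pvIdx monkeys x).isSome = true) : x ∈ monkeys.map Prod.fst := by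
  induction monkeys with
  | nil => simp [pvIdx] at h
  | cons p t ih =>
    rw [pvIdx, List.findIdx?_cons] at h
    by_cases hp : (p.1 == x) = true
    · simp only [List.map_cons, List.mem_cons]
      exact Or.inl (by simpa using (beq_iff_eq.mp hp).symm)
    · simp only [hp, Bool.false_eq_true, if_false] at h
      simp only [List.map_cons, List.mem_cons]
      refine Or.inr (ih ?_)
      rw [pvIdx]
      rw [Option.isSome_map] at h
      exact h

theorem pv_rank_le (monkeys : List (String × String)) (command : String) (w : String) :
    pvRank monkeys command w ≤ monkeys.length := by
  unfold pvRank
  have hsub : ((pvD monkeys command w).filter (fun x => (pvIdx monkeys x).isSome)).toFinset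
      ⊆ (monkeys.map Prod.fst).toFinset := by
    intro y hy
    rw [List.mem_toFinset, List.mem_filter] at hy
    rw [List.mem_toFinset]
    exact pv_key_mem_fst monkeys y hy.2
  calc _ ≤ (monkeys.map Prod.fst).toFinset.card := Finset.card_le_card hsub
    _ ≤ (monkeys.map Prod.fst).length := List.toFinset_card_le _
    _ = monkeys.length := List.length_map _

-- ---- termination and stability of the expansion under Pre_ ----

theorem pv_allterm (monkeys : List (String × String)) (command : String)
    (hpre : Pre_get_command2 monkeys command) :
    ∀ (m : Nat) (w : String), (pvTm w = true ∨ w ∈ pvR monkeys command) →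
    pvRank monkeys command w < m →
    ((pvEx (PySem.Dict.mk monkeys) m w).all pvTm) = true := by
  intro m
  induction m with
  | zero => intro w _ hlt; omega
  | succ m ih =>
    intro w hok hlt
    by_cases htm : pvTm w = true
    · simp [pvEx, htm]
    · rcases hok with h | hwR
      · exact absurd h htm
      simp only [pvEx, htm, Bool.false_eq_true, if_false]
      simp only [List.all_eq_true, List.mem_cons, List.mem_append, List.mem_flatMap,
        List.mem_singleton]
      rintro x ((rfl | ⟨t, ht, hx⟩) | (rfl | hemp))
      · exact pv_tm_lpar
      · by_cases htt : pvTm t = true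
        · rw [pv_ex_tm _ _ t htt] at hx
          simp only [List.mem_singleton] at hx
          subst hx; exact htt
        · have hkid : t ∈ pvKids (PySem.Dict.mk monkeys) w := by
            unfold pvKids
            exact List.mem_filter.mpr ⟨ht, by simp [pvNt, htm, Bool.not_eq_true'] at htt ⊢; exact htt⟩
          have htR : t ∈ pvR monkeys command := pv_R_closed monkeys command w hwR t hkid
          have hrt : pvRank monkeys command t < pvRank monkeys command w :=
            pv_rank_lt monkeys command hpre w t hwR hkid
          exact List.all_eq_true.mp (ih t (Or.inr htR) (by omega)) x hx
      · exact pv_tm_rpar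
      · exact absurd hemp (List.not_mem_nil)

theorem pv_stab (monkeys : List (String × String)) (command : String)
    (hpre : Pre_get_command2 monkeys command) :
    ∀ (m n : Nat) (w : String), (pvTm w = true ∨ w ∈ pvR monkeys command) →
    pvRank monkeys command w < m → pvRank monkeys command w < n →
    pvEx (PySem.Dict.mk monkeys) m w = pvEx (PySem.Dict.mk monkeys) n w := by
  intro m
  induction m with
  | zero => intro n w _ hm; omega
  | succ m ih =>
    intro n w hok hm hn
    obtain ⟨n', rfl⟩ : ∃ n', n = n' + 1 := ⟨n - 1, by omega⟩
    by_cases htm : pvTm w = true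
    · simp [pvEx, htm]
    · rcases hok with h | hwR
      · exact absurd h htm
      simp only [pvEx, htm, Bool.false_eq_true, if_false]
      congr 1
      congr 1
      refine List.flatMap_congr ?_
      intro t ht
      by_cases htt : pvTm t = true
      · rw [pv_ex_tm _ _ t htt, pv_ex_tm _ _ t htt]
      · have hkid : t ∈ pvKids (PySem.Dict.mk monkeys) w := by
          unfold pvKids
          exact List.mem_filter.mpr ⟨ht, by simp [pvNt, Bool.not_eq_true'] at htt ⊢; exact htt⟩
        have htR : t ∈ pvR monkeys command := pv_R_closed monkeys command w hwR t hkid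
        have hrt : pvRank monkeys command t < pvRank monkeys command w :=
          pv_rank_lt monkeys command hpre w t hwR hkid
        exact ih n' t (Or.inr htR) (by omega) (by omega)

-- every token of the command is terminal or reachable
theorem pv_cmd_ok (monkeys : List (String × String)) (command : String) :
    ∀ w ∈ PySem.Str.split₀ command, pvTm w = true ∨ w ∈ pvR monkeys command := by
  intro w hw
  by_cases htm : pvTm w = true
  · exact Or.inl htm
  · refine Or.inr (pv_mem_close_of_mem _ _ _ w ?_)
    exact List.mem_filter.mpr ⟨hw, by simp [pvNt, Bool.not_eq_true'] at htm ⊢; exact htm⟩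

-- ---- the B-side loop ----

theorem pv_cond (w : String) : (!(w == "humn") && (PySem.Str.len w == 4)) = !pvTm w := by
  simp [pvTm]

theorem pv_loopB (monkeys : List (String × String)) (command : String)
    (h : Pre_get_command2 monkeys command) :
    ∀ (f : Nat) (stack parts : List String),
    (∀ w ∈ stack, pvTm w = true ∨ w ∈ pvR monkeys command) →
    ((stack.flatMap (pvEx (PySem.Dict.mk monkeys) (monkeys.length + 1))).length ≤ f) →
    get_command2_alt_go (PySem.Dict.mk monkeys) f stack parts
      = parts ++ stack.flatMap (pvEx (PySem.Dict.mk monkeys) (monkeys.length + 1)) := by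
  intro f
  induction f with
  | zero =>
    intro stack parts hb hφ
    cases stack with
    | nil => simp [get_command2_alt_go]
    | cons w rest =>
      exfalso
      have := pv_ex_len_pos (PySem.Dict.mk monkeys) (monkeys.length + 1) w
      simp only [List.flatMap_cons, List.length_append] at hφ
      omega
  | succ f ih =>
    intro stack parts hb hφ
    cases stack with
    | nil => simp [get_command2_alt_go]
    | cons w rest =>
      have hbrest : ∀ x ∈ rest, pvTm x = true ∨ x ∈ pvR monkeys command :=
        fun x hx => hb x (by simp [hx])
      simp only [get_command2_alt_go, pv_cond]
      by_cases htm : pvTm w = true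
      · simp only [htm, Bool.not_true, Bool.false_eq_true, if_false]
        rw [ih rest (parts ++ [w]) hbrest ?hφ']
        case hφ' =>
          simp only [List.flatMap_cons, pv_ex_tm _ _ w htm, List.singleton_append,
            List.length_cons] at hφ
          omega
        simp [pv_ex_tm _ _ w htm]
      · have hwR : w ∈ pvR monkeys command := by
          rcases hb w (by simp) with ht | hR
          · exact absurd ht htm
          · exact hR
        simp only [htm, Bool.not_false, if_true]
        have hbch : ∀ x ∈ PySem.Str.split₀ ((PySem.Dict.mk monkeys).getD w ""),
            pvTm x = true ∨ x ∈ pvR monkeys command := by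
          intro x hx
          by_cases hxt : pvTm x = true
          · exact Or.inl hxt
          · refine Or.inr (pv_R_closed monkeys command w hwR x ?_)
            unfold pvKids
            exact List.mem_filter.mpr ⟨hx, by simp [pvNt, Bool.not_eq_true'] at hxt ⊢; exact hxt⟩
        have hstab : ∀ x ∈ PySem.Str.split₀ ((PySem.Dict.mk monkeys).getD w ""),
            pvEx (PySem.Dict.mk monkeys) monkeys.length x
              = pvEx (PySem.Dict.mk monkeys) (monkeys.length + 1) x := by
          intro x hx
          by_cases hxt : pvTm x = true
          · rw [pv_ex_tm _ _ x hxt, pv_ex_tm _ _ x hxt]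
          · have hkid : x ∈ pvKids (PySem.Dict.mk monkeys) w := by
              unfold pvKids
              exact List.mem_filter.mpr ⟨hx, by simp [pvNt, Bool.not_eq_true'] at hxt ⊢; exact hxt⟩
            have hxR : x ∈ pvR monkeys command := pv_R_closed monkeys command w hwR x hkid
            have hrx : pvRank monkeys command x < pvRank monkeys command w :=
              pv_rank_lt monkeys command h w x hwR hkid
            have hrw : pvRank monkeys command w ≤ monkeys.length := pv_rank_le monkeys command w
            exact pv_stab monkeys command h monkeys.length (monkeys.length + 1) x
              (Or.inr hxR) (by omega) (by omega)
        have hexw : pvEx (PySem.Dict.mk monkeys) (monkeys.length + 1) w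
            = "(" :: ((PySem.Str.split₀ ((PySem.Dict.mk monkeys).getD w "")).flatMap
                (pvEx (PySem.Dict.mk monkeys) (monkeys.length + 1))) ++ [")"] := by
          simp only [pvEx, htm, Bool.false_eq_true, if_false]
          exact congrArg (fun l => "(" :: (l ++ [")"])) (List.flatMap_congr hstab)
        rw [ih _ (parts ++ ["("]) ?hb' ?hφ']
        case hb' =>
          intro x hx
          rcases List.mem_append.mp hx with hx | hx
          · exact hbch x hx
          · rcases List.mem_cons.mp hx with rfl | hx
            · exact Or.inl pv_tm_rpar
            · exact hbrest x hx
        case hφ' =>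
          simp only [List.flatMap_cons, List.flatMap_append, List.length_append, hexw,
            pv_ex_tm _ _ ")" pv_tm_rpar] at hφ ⊢
          simp only [List.length_cons, List.length_append] at hφ
          simp only [List.length_singleton]
          omega
        simp only [List.flatMap_cons, List.flatMap_append, hexw, pv_ex_tm _ _ ")" pv_tm_rpar]
        simp [List.append_assoc]

theorem pv_val_tokens (monkeys : List (String × String)) (w : String) :
    (PySem.Str.split₀ ((PySem.Dict.mk monkeys).getD w "")).length + 2
      ≤ (monkeys.map (fun p => (PySem.Str.split₀ p.2).length)).sum + 2 := by
  cases hg : (PySem.Dict.mk monkeys).get? w with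
  | none => simp [PySem.Dict.getD, hg, pv_ssplit_empty]
  | some v =>
    have hitems : (w, v) ∈ (PySem.Dict.mk monkeys).items :=
      PySem.Dict.mem_items_of_get?_eq_some _ hg
    have hm : (w, v) ∈ monkeys := hitems
    have hmem : (PySem.Str.split₀ v).length ∈ monkeys.map (fun p => (PySem.Str.split₀ p.2).length) :=
      List.mem_map.mpr ⟨(w, v), hm, rfl⟩
    have := List.single_le_sum (l := monkeys.map (fun p => (PySem.Str.split₀ p.2).length))
      (fun x _ => Nat.zero_le x) _ hmem
    simp only [PySem.Dict.getD, hg, Option.getD_some]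
    omega

theorem pv_ex_len (monkeys : List (String × String)) (tot : Nat)
    (htot : (monkeys.map (fun p => (PySem.Str.split₀ p.2).length)).sum + 2 ≤ tot) :
    ∀ (m : Nat) (w : String), (pvEx (PySem.Dict.mk monkeys) m w).length ≤ tot ^ (m + 1) := by
  intro m
  induction m with
  | zero =>
    intro w
    simp only [pvEx, List.length_singleton]
    exact Nat.one_le_pow _ _ (by omega)
  | succ m ih =>
    intro w
    by_cases htm : pvTm w = true
    · simp only [pvEx, htm, if_true, List.length_singleton]
      exact Nat.one_le_pow _ _ (by omega)
    · simp only [pvEx, htm, Bool.false_eq_true, if_false, List.length_cons, List.length_append,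
        List.length_singleton]
      have hch : (PySem.Str.split₀ ((PySem.Dict.mk monkeys).getD w "")).length + 2 ≤ tot := by
        have := pv_val_tokens monkeys w; omega
      have hsum : ((PySem.Str.split₀ ((PySem.Dict.mk monkeys).getD w "")).flatMap
          (pvEx (PySem.Dict.mk monkeys) m)).length
          ≤ (PySem.Str.split₀ ((PySem.Dict.mk monkeys).getD w "")).length * tot ^ (m + 1) := by
        rw [List.length_flatMap]
        have := List.sum_le_card_nsmul
          ((PySem.Str.split₀ ((PySem.Dict.mk monkeys).getD w "")).map
            (fun a => (pvEx (PySem.Dict.mk monkeys) m a).length)) (tot ^ (m + 1))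
          (by intro x hx; obtain ⟨a, _, rfl⟩ := List.mem_map.mp hx; exact ih a)
        simpa [smul_eq_mul] using this
      have hX : 1 ≤ tot ^ (m + 1) := Nat.one_le_pow _ _ (by omega)
      calc ((PySem.Str.split₀ ((PySem.Dict.mk monkeys).getD w "")).flatMap
              (pvEx (PySem.Dict.mk monkeys) m)).length + 1 + 1
          ≤ (PySem.Str.split₀ ((PySem.Dict.mk monkeys).getD w "")).length * tot ^ (m + 1) + 2 := by omega
        _ ≤ (PySem.Str.split₀ ((PySem.Dict.mk monkeys).getD w "")).length * tot ^ (m + 1)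
              + 2 * tot ^ (m + 1) := by omega
        _ = ((PySem.Str.split₀ ((PySem.Dict.mk monkeys).getD w "")).length + 2) * tot ^ (m + 1) := by ring
        _ ≤ tot * tot ^ (m + 1) := Nat.mul_le_mul_right _ hch
        _ = tot ^ (m + 1 + 1) := by ring

-- ===== VERDICT (by name: the statement is the Claim_ definition above) =====
theorem get_command2_spec : Claim_equal_get_command2 := by
  intro monkeys command _ hpre
  unfold Spec_get_command2
  have hall : ((PySem.Str.split₀ command).flatMap
      (pvEx (PySem.Dict.mk monkeys) (monkeys.length + 1))).all pvTm = true := by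
    rw [List.all_eq_true]
    intro x hx
    obtain ⟨w, hw, hx⟩ := List.mem_flatMap.mp hx
    have hok := pv_cmd_ok monkeys command w hw
    have := pv_allterm monkeys command hpre (monkeys.length + 1) w hok
      (by have := pv_rank_le monkeys command w; omega)
    exact List.all_eq_true.mp this x hx
  have hA : get_command2 monkeys command
      = pvRender ((PySem.Str.split₀ command).flatMap (pvEx (PySem.Dict.mk monkeys) (monkeys.length + 1))) := by
    unfold get_command2
    exact pv_loopA (PySem.Dict.mk monkeys) (monkeys.length + 1) (monkeys.length + 2)
      (by omega) command hall
  have hφ : ((PySem.Str.split₀ command).flatMap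
        (pvEx (PySem.Dict.mk monkeys) (monkeys.length + 1))).length
      ≤ ((PySem.Str.split₀ command).length
          + (monkeys.map (fun p => (PySem.Str.split₀ p.2).length)).sum + 2) ^ (monkeys.length + 3) := by
    set tot := (PySem.Str.split₀ command).length
      + (monkeys.map (fun p => (PySem.Str.split₀ p.2).length)).sum + 2 with htot
    have hlen : ∀ w ∈ PySem.Str.split₀ command,
        (pvEx (PySem.Dict.mk monkeys) (monkeys.length + 1) w).length ≤ tot ^ (monkeys.length + 2) :=
      fun w _ => pv_ex_len monkeys tot (by omega) (monkeys.length + 1) w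
    have hsum : ((PySem.Str.split₀ command).flatMap
          (pvEx (PySem.Dict.mk monkeys) (monkeys.length + 1))).length
        ≤ (PySem.Str.split₀ command).length * tot ^ (monkeys.length + 2) := by
      rw [List.length_flatMap]
      have := List.sum_le_card_nsmul
        ((PySem.Str.split₀ command).map
          (fun a => (pvEx (PySem.Dict.mk monkeys) (monkeys.length + 1) a).length))
        (tot ^ (monkeys.length + 2))
        (by intro x hx; obtain ⟨a, ha, rfl⟩ := List.mem_map.mp hx; exact hlen a ha)
      simpa [smul_eq_mul] using this
    calc ((PySem.Str.split₀ command).flatMap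
            (pvEx (PySem.Dict.mk monkeys) (monkeys.length + 1))).length
        ≤ (PySem.Str.split₀ command).length * tot ^ (monkeys.length + 2) := hsum
      _ ≤ tot * tot ^ (monkeys.length + 2) := Nat.mul_le_mul_right _ (by omega)
      _ = tot ^ (monkeys.length + 3) := by ring
  have hB : get_command2_alt monkeys command
      = pvRender ((PySem.Str.split₀ command).flatMap (pvEx (PySem.Dict.mk monkeys) (monkeys.length + 1))) := by
    rw [show get_command2_alt monkeys command
        = PySem.Str.join "" ((get_command2_alt_go (PySem.Dict.mk monkeys)
            (((PySem.Str.split₀ command).length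
              + (monkeys.map (fun p => (PySem.Str.split₀ p.2).length)).sum + 2)
                ^ (monkeys.length + 3)) (PySem.Str.split₀ command) []).map (fun p => p ++ " "))
      from rfl]
    rw [pv_loopB monkeys command hpre _ _ []
      (pv_cmd_ok monkeys command) hφ]
    rfl
  rw [hA, hB]
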